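-- pv_equiv track=rewrite | github.com/IhToN/DAW1-PRG | Ejercicios/Ejercicio50.py | contactos_duplicados
-- ===== SOURCE A (Python) =====
-- def contactos_duplicados(agenda):
--     """ Devuelve una agenda cuya clave será el teléfono y su valor los nombres de los contactos
--     con dicho teléfono.
--     """
--     ret = dict()
--     for clave, valor in agenda.items():
--         if valor in ret.keys():
--             ret[valor].append(clave)
--         else:
--             ret[valor] = [clave]
--     return ret
-- ===== SOURCE B (Python) =====
-- def contactos_duplicados(agenda):
--     """ Devuelve una agenda cuya clave sera el telefono y su valor los nombres de los contactos
--     con dicho telefono.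
--     """
--     unique = dict.fromkeys(agenda.values())
--     return {telefono: [nombre for nombre, valor in agenda.items() if valor == telefono]
--             for telefono in unique}
-- ===== Notes on version B (the rewrite author's own statement) =====
-- stated objective: alternative
-- what changed: Replaces the single accumulating dict-building pass with an index-then-scan shape: first the distinct phone numbers in first-appearance order (dict.fromkeys), then one comprehension per phone collecting its names.
import Mathlib
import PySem

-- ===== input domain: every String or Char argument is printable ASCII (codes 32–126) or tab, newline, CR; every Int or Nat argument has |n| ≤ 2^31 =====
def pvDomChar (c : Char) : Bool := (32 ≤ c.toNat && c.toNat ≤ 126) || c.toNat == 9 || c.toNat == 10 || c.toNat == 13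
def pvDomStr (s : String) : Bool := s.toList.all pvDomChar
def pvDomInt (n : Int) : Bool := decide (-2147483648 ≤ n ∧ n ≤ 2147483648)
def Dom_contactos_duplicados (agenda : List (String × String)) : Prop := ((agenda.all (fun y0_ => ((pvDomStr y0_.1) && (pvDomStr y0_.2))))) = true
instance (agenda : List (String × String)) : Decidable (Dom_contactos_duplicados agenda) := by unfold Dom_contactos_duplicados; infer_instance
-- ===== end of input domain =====

-- B replaces A's single accumulating dict-building pass with an index-then-scan shape
-- (distinct phones first, then one scan per phone); same result, alternative structure.

-- ===== PORT A =====
-- ret = dict(); for clave, valor in agenda: if valor in ret: ret[valor].append(clave) else ret[valor] = [clave]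
def contactos_duplicados (agenda : List (String × String)) : List (String × List String) :=
  (agenda.foldl
    (fun ret p =>
      if ret.contains p.2 then ret.modify p.2 [] (fun l => l ++ [p.1])
      else ret.insert p.2 [p.1])
    (PySem.Dict.empty)).items

-- ===== PORT B =====
-- unique = dict.fromkeys(agenda.values()); {t: [n for n, v in agenda if v == t] for t in unique}
def contactos_duplicados_alt (agenda : List (String × String)) : List (String × List String) :=
  (PySem.List.dedup (agenda.map (fun p => p.2))).map
    (fun telefono => (telefono, (agenda.filter (fun p => p.2 == telefono)).map (fun p => p.1)))

-- ===== PRECONDITION & SPEC =====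
def Spec_contactos_duplicados (agenda : List (String × String)) (out : List (String × List String)) : Prop := out = contactos_duplicados_alt agenda
instance (agenda : List (String × String)) (out : List (String × List String)) : Decidable (Spec_contactos_duplicados agenda out) := by unfold Spec_contactos_duplicados; infer_instance

-- ===== CLAIM (what is proved, stated in full; the proofs are below) =====
def Claim_equal_contactos_duplicados : Prop := ∀ (agenda : List (String × String)), Dom_contactos_duplicados agenda → Spec_contactos_duplicados agenda (contactos_duplicados agenda)

-- ===== LEMMAS AND PROOFS =====

-- A's if-branching step is exactly 'modify' (append to existing entry, or start one at the end).
theorem pv_step_eq_modify (d : PySem.Dict String (List String)) (p : String × String) :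
    (if d.contains p.2 then d.modify p.2 [] (fun l => l ++ [p.1]) else d.insert p.2 [p.1])
      = d.modify p.2 [] (fun l => l ++ [p.1]) := by
  by_cases h : d.contains p.2 = true
  · simp [h]
  · simp only [Bool.not_eq_true] at h
    simp [PySem.Dict.modify, PySem.Dict.getD_of_not_contains, h]

-- A's accumulating loop, rewritten as a pure modify loop over the swapped pairs.
theorem pv_fold_eq_swap (agenda : List (String × String)) :
    agenda.foldl
      (fun ret p =>
        if ret.contains p.2 then ret.modify p.2 [] (fun l => l ++ [p.1])
        else ret.insert p.2 [p.1])
      (PySem.Dict.empty)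
    = (agenda.map Prod.swap).foldl
        (fun ret q => ret.modify q.1 [] (fun l => l ++ [q.2])) (PySem.Dict.empty) := by
  rw [List.foldl_map]
  have hstep : (fun (ret : PySem.Dict String (List String)) (p : String × String) =>
      if ret.contains p.2 then ret.modify p.2 [] (fun l => l ++ [p.1])
      else ret.insert p.2 [p.1])
      = fun ret p => ret.modify p.2 [] (fun l => l ++ [p.1]) :=
    funext fun d => funext fun p => pv_step_eq_modify d p
  rw [hstep]
  rfl

theorem contactos_duplicados_eq (agenda : List (String × String)) :
    contactos_duplicados agenda = contactos_duplicados_alt agenda := by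
  unfold contactos_duplicados contactos_duplicados_alt
  rw [pv_fold_eq_swap]
  set l := agenda.map Prod.swap with hl
  have hnd : ((l.foldl (fun ret q => ret.modify q.1 [] (fun v => v ++ [q.2]))
      (PySem.Dict.empty (κ := String) (ν := List String)))).keys.Nodup := by
    exact PySem.Dict.nodup_keys_foldl_modify_key l (fun q => q.1) [] (fun d q v => v ++ [q.2])
      PySem.Dict.empty (by simp [pysem])
  rw [PySem.Dict.items_eq_map_keys _ hnd []]
  have hkeys : ((l.foldl (fun ret q => ret.modify q.1 [] (fun v => v ++ [q.2]))
      (PySem.Dict.empty (κ := String) (ν := List String)))).keys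
      = PySem.List.dedup (agenda.map (fun p => p.2)) := by
    rw [PySem.Dict.keys_foldl_modify_key l (fun q => q.1) [] (fun d q v => v ++ [q.2])]
    simp [pysem, hl, List.map_map, Function.comp, PySem.Set.ofList, PySem.Set.update, List.foldl_map]
  rw [hkeys]
  apply List.map_congr_left
  intro k _
  have hget := PySem.Dict.getD_foldl_modify_append l
    (PySem.Dict.empty (κ := String) (ν := List String)) k
  rw [hget]
  simp [hl, List.filter_map, List.map_map, Function.comp_def]

-- ===== VERDICT (by name: the statement is the Claim_ definition above) =====
theorem contactos_duplicados_spec : Claim_equal_contactos_duplicados := by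
  intro agenda _
  unfold Spec_contactos_duplicados
  exact contactos_duplicados_eq agenda
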